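-- pv_equiv track=rewrite | github.com/pypi-data/pypi-mirror-400 | packages/rxiv-maker/rxiv_maker-1.18.3-py3-none-any.whl/rxiv_maker/converters/custom_command_processor.py | _filter_latex_comments
-- ===== SOURCE A (Python) =====
-- def _filter_latex_comments(tex_code: str) -> str:
--     """Filter LaTeX comments from TeX code before processing.
--
--     Removes both full-line comments and inline comments while preserving
--     the structure for proper LaTeX processing.
--
--     Args:
--         tex_code: LaTeX code that may contain comments
--
--     Returns:
--         LaTeX code with comments filtered out
--     """
--     lines = tex_code.split("\n")
--     filtered_lines = []
--
--     for line in lines: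
--         # In LaTeX, everything after % is a comment (unless % is escaped as \%)
--         comment_pos = _find_latex_comment_start(line)
--
--         if comment_pos == 0:
--             # Entire line is a comment, replace with empty line
--             filtered_lines.append("")
--         elif comment_pos > 0:
--             # Inline comment, keep content before %
--             filtered_lines.append(line[:comment_pos].rstrip())
--         else:
--             # No comment found, keep entire line
--             filtered_lines.append(line)
--
--     return "\n".join(filtered_lines)
--
-- def _find_latex_comment_start(line: str) -> int:
--     r"""Find the position where a LaTeX comment starts.
--
--     Handles escaped % (\\%) correctly.
--
--     Args:
--         line: Line of LaTeX code
--
--     Returns: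
--         Position of % comment start, -1 if no comment, 0 if entire line is comment
--     """
--     # Skip lines that are entirely whitespace
--     if not line.strip():
--         return -1
--
--     # Check if line starts with % (full line comment)
--     if line.lstrip().startswith("%"):
--         return 0
--
--     # Look for unescaped %
--     i = 0
--     while i < len(line):
--         if line[i] == "%":
--             # Check if it's escaped (preceded by odd number of backslashes)
--             backslash_count = 0
--             j = i - 1
--             while j >= 0 and line[j] == "\\":
--                 backslash_count += 1
--                 j -= 1
--
--             # If even number of backslashes (including 0), % is not escaped
--             if backslash_count % 2 == 0:
--                 return i
--         i += 1
--
--     return -1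
-- ===== SOURCE B (Python) =====
-- def _filter_latex_comments(tex_code: str) -> str:
--     """Single forward pass per line: track the parity of the current run of
--     backslashes and the index of the last non-whitespace character, so the
--     comment cut-off and the trailing-whitespace trim come from one scan."""
--     out = []
--     for line in tex_code.split("\n"):
--         kept = line
--         odd = False   # odd number of consecutive backslashes just before i
--         last = -1     # index of the last non-whitespace character seen
--         for i, ch in enumerate(line):
--             if ch == "%" and not odd:
--                 kept = line[: last + 1]
--                 break
--             odd = (not odd) if ch == "\\" else False
--             if not ch.isspace():
--                 last = i
--         out.append(kept)
--     return "\n".join(out)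
-- ===== Notes on version B (the rewrite author's own statement) =====
-- stated objective: alternative
-- what changed: Per line, A re-derives strip/lstrip prefixes and, at every percent sign, rescans backwards to count preceding backslashes; B makes one forward pass per line tracking the backslash-run parity and the index of the last non-whitespace character, cutting the line at the first unescaped percent sign.
import Mathlib
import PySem

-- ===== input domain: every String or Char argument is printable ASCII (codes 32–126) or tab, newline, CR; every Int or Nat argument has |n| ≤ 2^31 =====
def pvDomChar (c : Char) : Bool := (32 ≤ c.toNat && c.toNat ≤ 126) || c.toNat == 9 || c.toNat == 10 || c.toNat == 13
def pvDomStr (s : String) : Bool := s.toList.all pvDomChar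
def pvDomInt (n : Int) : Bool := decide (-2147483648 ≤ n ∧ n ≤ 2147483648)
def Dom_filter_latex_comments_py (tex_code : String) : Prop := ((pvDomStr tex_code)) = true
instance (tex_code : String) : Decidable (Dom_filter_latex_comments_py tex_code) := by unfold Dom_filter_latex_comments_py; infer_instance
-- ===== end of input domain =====

-- B replaces A's per-line rescanning (a backward backslash count at each percent sign, plus separate
-- strip/lstrip passes) by a single forward scan per line; same return value, proved equal.

-- ===== PORT A =====

-- backslash_count loop of `_find_latex_comment_start`: number of consecutive '\'
-- ending just before position i (the argument is i itself; step k+1 looks at line[k]).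
def pvBackCount (ln : List Char) : Nat → Nat
  | 0 => 0
  | k + 1 => if ln.getD k ' ' == '\\' then pvBackCount ln k + 1 else 0

-- the `while i < len(line)` loop of `_find_latex_comment_start`
def pvScanA (ln : List Char) (i : Nat) : Int :=
  if h : i < ln.length then
    if ln[i] == '%' then
      if pvBackCount ln i % 2 == 0 then (i : Int) else pvScanA ln (i + 1)
    else pvScanA ln (i + 1)
  else -1
termination_by ln.length - i
decreasing_by all_goals omega

-- _find_latex_comment_start
def pvFindStartA (ln : List Char) : Int :=
  if PySem.Chars.strip ln = [] then -1
  else if PySem.Chars.startswith (PySem.Chars.lstrip ln) ['%'] then 0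
  else pvScanA ln 0

-- one iteration of the `for line in lines` loop of A
def pvProcA (ln : List Char) : List Char :=
  let p := pvFindStartA ln
  if p = 0 then []
  else if p > 0 then PySem.Chars.rstrip (PySem.List.slice ln none (some p))
  else ln

def filter_latex_comments_py (tex_code : String) : String :=
  String.ofList (PySem.Chars.join ['\n'] ((PySem.Chars.splitOn tex_code.toList ['\n']).map pvProcA))

-- ===== PORT B =====

-- B's inner `for i, ch in enumerate(line)` loop: odd = backslash-run parity,
-- last = index of the last non-whitespace character (-1 if none yet).
def pvGoB (ln : List Char) : List Char → Nat → Bool → Int → List Char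
  | [], _, _, _ => ln
  | c :: rest, i, odd, last =>
    if c == '%' && !odd then PySem.List.slice ln none (some (last + 1))
    else pvGoB ln rest (i + 1) (if c == '\\' then !odd else false)
           (if PySem.Chars.isspace c then last else (i : Int))

def pvProcB (ln : List Char) : List Char :=
  pvGoB ln ln 0 false (-1)

def filter_latex_comments_py_alt (tex_code : String) : String :=
  String.ofList (PySem.Chars.join ['\n'] ((PySem.Chars.splitOn tex_code.toList ['\n']).map pvProcB))

-- ===== PRECONDITION & SPEC =====
def Spec_filter_latex_comments_py (tex_code : String) (out : String) : Prop := out = filter_latex_comments_py_alt tex_code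
instance (tex_code : String) (out : String) : Decidable (Spec_filter_latex_comments_py tex_code out) := by unfold Spec_filter_latex_comments_py; infer_instance

-- ===== CLAIM (what is proved, stated in full; the proofs are below) =====
def Claim_equal_filter_latex_comments_py : Prop := ∀ (tex_code : String), Dom_filter_latex_comments_py tex_code → Spec_filter_latex_comments_py tex_code (filter_latex_comments_py tex_code)

-- ===== LEMMAS AND PROOFS =====

theorem pv_rstrip_prefix (cs : List Char) : PySem.Chars.rstrip cs <+: cs := by
  have h := List.dropWhile_suffix (p := PySem.Chars.isspace) (l := cs.reverse)
  have := List.reverse_prefix.mpr h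
  simpa [PySem.Chars.rstrip] using this

theorem pv_rstrip_append_ws {c : Char} (cs : List Char) (h : PySem.Chars.isspace c = true) :
    PySem.Chars.rstrip (cs ++ [c]) = PySem.Chars.rstrip cs := by
  simp [PySem.Chars.rstrip, h]

theorem pv_rstrip_append_nonws {c : Char} (cs : List Char) (h : PySem.Chars.isspace c = false) :
    PySem.Chars.rstrip (cs ++ [c]) = cs ++ [c] := by
  simp [PySem.Chars.rstrip, h]

theorem pvGoB_eq (ln : List Char) (i : Nat) (hi : i ≤ ln.length) :
    pvGoB ln (ln.drop i) i (decide (pvBackCount ln i % 2 = 1))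
        ((PySem.Chars.rstrip (ln.take i)).length - 1) =
      (if pvScanA ln i = -1 then ln
       else ln.take (PySem.Chars.rstrip (ln.take (pvScanA ln i).toNat)).length) := by
  generalize hk : ln.length - i = k
  induction k generalizing i with
  | zero =>
    have : i = ln.length := by omega
    subst this
    rw [pvScanA]
    simp [pvGoB]
  | succ k ih =>
    have hi' : i < ln.length := by omega
    have hdrop : ln.drop i = ln[i] :: ln.drop (i+1) := List.drop_eq_getElem_cons hi'
    have htake : ln.take (i+1) = ln.take i ++ [ln[i]] := by
      rw [← List.take_concat_get (l := ln) (h := hi')]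
      simp [List.concat_eq_append]
    have hbc1 : pvBackCount ln (i+1) = if ln[i] == '\\' then pvBackCount ln i + 1 else 0 := by
      simp [pvBackCount, List.getD, hi']
    rw [hdrop, pvGoB, pvScanA]
    simp only [hi', dif_pos]
    by_cases hc : ln[i] = '%'
    · by_cases hb : pvBackCount ln i % 2 = 0
      · -- break: unescaped %
        have e1 : (ln[i] == '%' && !decide (pvBackCount ln i % 2 = 1)) = true := by simp [hc]; omega
        have e2 : (ln[i] == '%') = true := by simp [hc]
        have e3 : (pvBackCount ln i % 2 == 0) = true := by simp [hb]
        simp only [e2, e3, if_true]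
        rw [if_neg (show ¬((i : Int) = -1) by omega)]
        have hlen : ((PySem.Chars.rstrip (ln.take i)).length : Int) - 1 + 1
            = ((PySem.Chars.rstrip (ln.take i)).length : Int) := by ring
        rw [hlen, PySem.List.slice_to _ (by positivity)]
        simp
        intro hcontra
        exact absurd hcontra (by omega)
      · -- escaped %: recurse
        have e1 : (ln[i] == '%' && !decide (pvBackCount ln i % 2 = 1)) = false := by simp [hc]; omega
        have e2 : (ln[i] == '%') = true := by simp [hc]
        have e3 : (pvBackCount ln i % 2 == 0) = false := by simp; omega
        have e4 : (true && !decide (pvBackCount ln i % 2 = 1)) = false := by simp; omega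
        have e5 : (ln[i] == '\\') = false := by simp [hc]
        have hws : PySem.Chars.isspace ln[i] = false := by rw [hc]; decide
        have hbc0 : pvBackCount ln (i+1) = 0 := by rw [hbc1]; simp [e5]
        simp only [e2, e3, e4, e5, hws, Bool.false_eq_true, if_true, if_false]
        have IH := ih (i+1) (by omega) (by omega)
        rw [hbc0] at IH
        norm_num at IH
        rw [htake, pv_rstrip_append_nonws _ hws] at IH
        have harg : ((List.take i ln ++ [ln[i]]).length : Int) - 1 = (i : Int) := by
          push_cast [List.length_append, List.length_take, List.length_cons, List.length_nil]
          omega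
        rw [harg] at IH
        exact IH
    · -- not a %: recurse
      have e1 : (ln[i] == '%' && !decide (pvBackCount ln i % 2 = 1)) = false := by simp [hc]
      have e2 : (ln[i] == '%') = false := by simp [hc]
      simp only [e2, Bool.false_eq_true, Bool.false_and, if_false]
      have hodd : (if (ln[i] == '\\') = true then !decide (pvBackCount ln i % 2 = 1) else false)
          = decide (pvBackCount ln (i+1) % 2 = 1) := by
        by_cases hbs : ln[i] = '\\'
        · rw [hbc1]
          rcases Nat.mod_two_eq_zero_or_one (pvBackCount ln i) with h | h <;>
            simp [hbs, h, Nat.add_mod]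
        · have e5 : (ln[i] == '\\') = false := by simp [hbs]
          rw [hbc1]
          simp [e5]
      have hlast : (if PySem.Chars.isspace ln[i] = true then ((PySem.Chars.rstrip (ln.take i)).length : Int) - 1 else (i : Int))
          = ((PySem.Chars.rstrip (ln.take (i+1))).length : Int) - 1 := by
        by_cases hws : PySem.Chars.isspace ln[i] = true
        · rw [if_pos hws, htake, pv_rstrip_append_ws _ hws]
        · have hws' : PySem.Chars.isspace ln[i] = false := by simpa using hws
          rw [if_neg (by simp [hws']), htake, pv_rstrip_append_nonws _ hws']
          push_cast [List.length_append, List.length_take, List.length_cons, List.length_nil]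
          omega
      rw [hodd, hlast]
      exact ih (i+1) (by omega) (by omega)

theorem pvScanA_cases (ln : List Char) (i : Nat) :
    pvScanA ln i = -1 ∨ (0 ≤ pvScanA ln i ∧ (pvScanA ln i).toNat < ln.length ∧
      ln.getD (pvScanA ln i).toNat ' ' = '%') := by
  generalize hk : ln.length - i = k
  induction k generalizing i with
  | zero =>
    left; rw [pvScanA]; simp [show ¬ i < ln.length by omega]
  | succ k ih =>
    have hi : i < ln.length := by omega
    rw [pvScanA]
    simp only [hi, dif_pos]
    by_cases hc : ln[i] == '%'
    · by_cases hb : pvBackCount ln i % 2 == 0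
      · simp only [hc, hb, if_true]
        right
        refine ⟨by positivity, by simpa using hi, ?_⟩
        simp [List.getD, hi]
        exact beq_iff_eq.mp hc
      · simp only [hc, hb, if_true]
        exact ih (i+1) (by omega)
    · simp only [hc]
      exact ih (i+1) (by omega)

theorem pv_ws_prefix_scan (ln t d' : List Char) (hln : ln = t ++ '%' :: d')
    (hws : ∀ c ∈ t, PySem.Chars.isspace c = true) :
    ∀ i, i ≤ t.length → pvScanA ln i = t.length := by
  intro i hi
  have hlen : ln.length = t.length + 1 + d'.length := by simp [hln]; omega
  generalize hk : t.length - i = k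
  induction k generalizing i with
  | zero =>
    have hit : i = t.length := by omega
    rw [pvScanA]
    have h1 : i < ln.length := by omega
    have h2 : ln[i]'h1 = '%' := by
      subst hln
      rw [List.getElem_append_right (by omega)]
      simp [hit]
    have h3 : pvBackCount ln i % 2 = 0 := by
      rcases Nat.eq_zero_or_pos i with h0 | hpos
      · subst h0; simp [pvBackCount]
      · obtain ⟨j, rfl⟩ : ∃ j, i = j + 1 := ⟨i - 1, by omega⟩
        have hj : j < t.length := by omega
        have hgd : ln.getD j ' ' = t[j] := by
          subst hln
          rw [List.getD_eq_getElem _ _ (by simp; omega), List.getElem_append_left hj]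
        have hbs : t[j] ≠ '\\' := fun hb =>
          absurd (hws t[j] (List.getElem_mem hj)) (by rw [hb]; decide)
        simp only [List.getD] at hgd
        simp [pvBackCount, hgd, hbs]
    have b2 : (ln[i]'h1 == '%') = true := by simp [h2]
    have b3 : (pvBackCount ln i % 2 == 0) = true := by simp [h3]
    rw [dif_pos h1, if_pos b2, if_pos b3, hit]
  | succ k ih =>
    have hi' : i < t.length := by omega
    have h1 : i < ln.length := by omega
    have h2 : ln[i]'h1 = t[i] := by
      subst hln
      exact List.getElem_append_left hi'
    have h3 : (ln[i]'h1 == '%') = false := by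
      rw [h2]
      have hwsi := hws t[i] (List.getElem_mem hi')
      by_cases hp : t[i] = '%'
      · rw [hp] at hwsi; exact absurd hwsi (by decide)
      · simp [hp]
    rw [pvScanA]
    simp only [h1, dif_pos, h3, Bool.false_eq_true, if_false]
    exact ih (i+1) (by omega) (by omega)

theorem pv_rstrip_nil_of_ws (cs : List Char) (h : ∀ c ∈ cs, PySem.Chars.isspace c = true) :
    PySem.Chars.rstrip cs = [] := by
  simp [PySem.Chars.rstrip, List.dropWhile_eq_nil_iff]
  intro c hc
  exact h c (by simpa using hc)

theorem pv_all_ws_of_strip_nil (cs : List Char) (h : PySem.Chars.strip cs = []) :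
    ∀ c ∈ cs, PySem.Chars.isspace c = true := by
  intro c hc
  have h2 : ∀ x ∈ PySem.Chars.lstrip cs, PySem.Chars.isspace x = true := by
    intro x hx
    have h3 : ∀ y ∈ (PySem.Chars.lstrip cs).reverse, PySem.Chars.isspace y = true := by
      simpa [PySem.Chars.strip, PySem.Chars.rstrip, List.dropWhile_eq_nil_iff] using h
    exact h3 x (by simpa using hx)
  rcases (List.takeWhile_append_dropWhile (p := PySem.Chars.isspace) (l := cs)) ▸ hc with hc'
  rcases List.mem_append.mp hc' with h1 | h1
  · exact List.mem_takeWhile_imp h1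
  · exact h2 c h1

-- B's per-line scan, rewritten through the invariant

theorem pvProcB_eq (ln : List Char) :
    pvProcB ln =
      (if pvScanA ln 0 = -1 then ln
       else ln.take (PySem.Chars.rstrip (ln.take (pvScanA ln 0).toNat)).length) := by
  have h := pvGoB_eq ln 0 (by omega)
  simpa [pvProcB, pvBackCount, PySem.Chars.rstrip] using h

theorem pv_proc_eq (ln : List Char) : pvProcA ln = pvProcB ln := by
  rw [pvProcB_eq, pvProcA, pvFindStartA]
  by_cases hstrip : PySem.Chars.strip ln = []
  · -- whitespace-only line: no '%' anywhere, scanA gives -1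
    have hws := pv_all_ws_of_strip_nil ln hstrip
    have hscan : pvScanA ln 0 = -1 := by
      rcases pvScanA_cases ln 0 with h | ⟨h0, hlt, hget⟩
      · exact h
      · exfalso
        have hmem : ('%') ∈ ln := by
          rw [← hget]
          rw [List.getD_eq_getElem _ _ hlt]
          exact List.getElem_mem hlt
        exact absurd (hws '%' hmem) (by decide)
    simp [hstrip, hscan]
  · by_cases hpc : PySem.Chars.startswith (PySem.Chars.lstrip ln) ['%']
    · -- full-line comment: scanA 0 = leading-whitespace count, both give []
      have hpre : ∃ d', PySem.Chars.lstrip ln = '%' :: d' := by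
        rcases hd : PySem.Chars.lstrip ln with _ | ⟨c, d'⟩
        · rw [hd] at hpc; simp [PySem.Chars.startswith] at hpc
        · rw [hd] at hpc
          simp [PySem.Chars.startswith, List.isPrefixOf] at hpc
          exact ⟨d', by rw [hpc]⟩
      obtain ⟨d', hd'⟩ := hpre
      have hsplit : ln = ln.takeWhile PySem.Chars.isspace ++ '%' :: d' := by
        conv_lhs => rw [← List.takeWhile_append_dropWhile (p := PySem.Chars.isspace) (l := ln)]
        rw [← hd']; rfl
      have htws : ∀ c ∈ ln.takeWhile PySem.Chars.isspace, PySem.Chars.isspace c = true :=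
        fun c hc => List.mem_takeWhile_imp hc
      have hscan := pv_ws_prefix_scan ln _ d' hsplit htws 0 (by omega)
      have htake : ln.take (ln.takeWhile PySem.Chars.isspace).length
          = ln.takeWhile PySem.Chars.isspace := by
        have h := List.take_left (l₁ := ln.takeWhile PySem.Chars.isspace) (l₂ := '%' :: d')
        rwa [← hsplit] at h
      simp only [hstrip, hpc, if_false, if_true, hscan]
      have : ¬ ((ln.takeWhile PySem.Chars.isspace).length : Int) = -1 := by omega
      rw [if_neg this]
      simp only [Int.toNat_natCast, htake, pv_rstrip_nil_of_ws _ htws]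
      simp
    · -- ordinary line
      have hpc' : PySem.Chars.startswith (PySem.Chars.lstrip ln) ['%'] = false := by
        simpa using hpc
      simp only [hstrip, hpc', Bool.false_eq_true, if_false]
      rcases pvScanA_cases ln 0 with hscan | ⟨h0, hlt, hget⟩
      · rw [hscan]
        norm_num
      · have hne0 : pvScanA ln 0 ≠ 0 := by
          intro h00
          have hg : ln.getD 0 ' ' = '%' := by
            have hh := hget; rwa [h00] at hh
          rcases hl : ln with _ | ⟨c, rest⟩
          · rw [h00, hl] at hlt; simp at hlt
          · have hc : c = '%' := by
              rw [hl] at hg; simpa [List.getD] using hg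
            rw [hl, hc] at hpc
            have hls : PySem.Chars.lstrip ('%' :: rest) = '%' :: rest := by
              simp [PySem.Chars.lstrip,
                    show PySem.Chars.isspace '%' = false by decide]
            rw [hls] at hpc
            exact hpc (by simp [PySem.Chars.startswith, List.isPrefixOf])
        have hneg1 : pvScanA ln 0 ≠ -1 := by omega
        rw [if_neg hne0, if_pos (by omega : pvScanA ln 0 > 0), if_neg hneg1,
            PySem.List.slice_to _ h0]
        have hpref : PySem.Chars.rstrip (ln.take (pvScanA ln 0).toNat) <+: ln :=
          (pv_rstrip_prefix _).trans (List.take_prefix _ _)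
        exact List.prefix_iff_eq_take.mp hpref

-- ===== VERDICT (by name: the statement is the Claim_ definition above) =====
theorem filter_latex_comments_py_spec : Claim_equal_filter_latex_comments_py := by
  intro tex _
  unfold Spec_filter_latex_comments_py filter_latex_comments_py filter_latex_comments_py_alt
  rw [show pvProcA = pvProcB from funext pv_proc_eq]
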